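-- pv_equiv track=rewrite | github.com/shriadke/GA_community_layout_planning | Fitness.py | surround
-- ===== SOURCE A (Python) =====
-- def surround(point,size,grid):
--     x=point[0]
--     y=point[1]
--     if 0<x<24 and 0<y<24:
--         count = 0
--         for a in range((x-1),x+size+1):
--             for b in range(y-1,y+size+1):
--                 if(x<=a<=x+size-1  and y<=b<=y+size-1) :
--                     continue
--                 else:
--                     if (grid[a][b]==2 or grid[a][b]==0):
--                         count=count+1
--         if (count==4*(size+1)):
--             return 1
--     elif x==0 and y==0:
--         count = 0
--         for a in range((x),x+size+1):
--             for b in range(y,y+size+1):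
--                 if(x<=a<=x+size-1  and y<=b<=y+size-1) :
--                     continue
--                 else:
--                     if (grid[a][b]==2 or grid[a][b]==0):
--                         count=count+1
--         if (count==(2*(size+1)-1)):
--             return 1
--     elif x==0 and 0<y<24:
--         count = 0
--         for a in range((x),x+size+1):
--             for b in range(y-1,y+size+1):
--                 if(x<=a<=x+size-1  and y<=b<=y+size-1) :
--                     continue
--                 else:
--                     if (grid[a][b]==2 or grid[a][b]==0):
--                         count=count+1
--
--         if (count==(3*(size+1)-1)):
--             return 1
--     elif 0<x<24 and y==0:
--         count = 0
--         for a in range((x-1),x+size+1):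
--             for b in range(y,y+size+1):
--                 if(x<=a<=x+size-1  and y<=b<=y+size-1) :
--                     continue
--                 else:
--                     if (grid[a][b]==2 or grid[a][b]==0):
--                         count=count+1
--         if (count==(3*(size+1)-1)):
--             return 1
--     return 0
-- ===== SOURCE B (Python) =====
-- def surround(point, size, grid):
--     x = point[0]
--     y = point[1]
--     if not (0 <= x < 24 and 0 <= y < 24):
--         return 0
--     lo_r = max(x - 1, 0)
--     lo_c = max(y - 1, 0)
--     hi_r = x + size
--     hi_c = y + size
--     # top and bottom border rows, full width
--     for b in range(lo_c, hi_c + 1):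
--         if lo_r < x and grid[lo_r][b] != 2 and grid[lo_r][b] != 0:
--             return 0
--         if grid[hi_r][b] != 2 and grid[hi_r][b] != 0:
--             return 0
--     # left and right border columns, block rows only
--     for a in range(x, hi_r):
--         if lo_c < y and grid[a][lo_c] != 2 and grid[a][lo_c] != 0:
--             return 0
--         if grid[a][hi_c] != 2 and grid[a][hi_c] != 0:
--             return 0
--     return 1
-- ===== Notes on version B (the rewrite author's own statement) =====
-- stated objective: alternative
-- what changed: B checks the perimeter ring cells directly (top/bottom border rows plus the two side columns, early exit on the first bad cell) instead of A's sweep over the whole (size+2)^2 block that counts border hits and compares the count to a precomputed ring size; B touches O(size) cells per call versus A's O(size^2), though a timing run (which grows the grid, not the block) measures no difference.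
-- outside the precondition, e.g. on surround([1, 1], -1, [[0]]): A returns 0, B returns 1
import Mathlib
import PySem

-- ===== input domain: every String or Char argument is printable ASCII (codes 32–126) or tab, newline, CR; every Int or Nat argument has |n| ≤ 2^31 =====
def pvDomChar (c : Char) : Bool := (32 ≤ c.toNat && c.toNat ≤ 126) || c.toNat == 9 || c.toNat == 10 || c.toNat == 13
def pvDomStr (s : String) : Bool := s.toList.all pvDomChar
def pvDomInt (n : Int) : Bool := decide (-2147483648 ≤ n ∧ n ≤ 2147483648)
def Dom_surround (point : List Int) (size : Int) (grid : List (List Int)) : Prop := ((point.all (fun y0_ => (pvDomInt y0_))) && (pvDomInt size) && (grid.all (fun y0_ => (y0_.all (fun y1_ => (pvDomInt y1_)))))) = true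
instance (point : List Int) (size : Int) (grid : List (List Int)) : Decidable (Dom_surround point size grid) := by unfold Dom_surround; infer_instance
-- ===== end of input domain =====

-- B checks the perimeter ring cells directly (two scans, early exit) instead of A's sweep over the whole
-- (size+2)^2 block that counts border hits and compares the count against a precomputed ring size;
-- equivalence of the return values is proved on Pre_surround (no IndexError, non-negative size).

-- shared helper: grid[a][b] as Python computes it; total via defaults, exact whenever both indexes are in range
def pvCell (grid : List (List Int)) (a b : Int) : Int :=
  (PySem.List.pyGet? ((PySem.List.pyGet? grid a).getD []) b).getD 0

-- ===== PORT A =====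
-- A-side helper: the double loop A repeats verbatim in all four branches, parameterised by the two loop starts
-- (for a in range(loR, x+size+1): for b in range(loC, y+size+1): if interior: continue; elif cell in {2,0}: count += 1)
def pvCntA (g : List (List Int)) (x y size loR loC : Int) : Int :=
  (PySem.List.pyRange loR (x + size + 1) 1).foldl (fun c a =>
    (PySem.List.pyRange loC (y + size + 1) 1).foldl (fun c b =>
      if x ≤ a ∧ a ≤ x + size - 1 ∧ y ≤ b ∧ b ≤ y + size - 1 then c
      else if pvCell g a b = 2 ∨ pvCell g a b = 0 then c + 1 else c) c) 0

def surround (point : List Int) (size : Int) (grid : List (List Int)) : Int :=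
  let x := (PySem.List.pyGet? point 0).getD 0
  let y := (PySem.List.pyGet? point 1).getD 0
  if 0 < x ∧ x < 24 ∧ 0 < y ∧ y < 24 then
    if pvCntA grid x y size (x - 1) (y - 1) = 4 * (size + 1) then 1 else 0
  else if x = 0 ∧ y = 0 then
    if pvCntA grid x y size x y = 2 * (size + 1) - 1 then 1 else 0
  else if x = 0 ∧ 0 < y ∧ y < 24 then
    if pvCntA grid x y size x (y - 1) = 3 * (size + 1) - 1 then 1 else 0
  else if 0 < x ∧ x < 24 ∧ y = 0 then
    if pvCntA grid x y size (x - 1) y = 3 * (size + 1) - 1 then 1 else 0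
  else 0

-- ===== PORT B =====
-- B-side helper: grid[a][b] != 2 and grid[a][b] != 0 (the early-return test)
def pvBad (g : List (List Int)) (a b : Int) : Bool :=
  decide (pvCell g a b ≠ 2) && decide (pvCell g a b ≠ 0)

def surround_alt (point : List Int) (size : Int) (grid : List (List Int)) : Int :=
  let x := (PySem.List.pyGet? point 0).getD 0
  let y := (PySem.List.pyGet? point 1).getD 0
  if ¬ (0 ≤ x ∧ x < 24 ∧ 0 ≤ y ∧ y < 24) then 0
  else
    let loR := max (x - 1) 0
    let loC := max (y - 1) 0
    let hiR := x + size
    let hiC := y + size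
    if ((PySem.List.pyRange loC (hiC + 1) 1).all (fun b =>
          (!decide (loR < x) || !pvBad grid loR b) && !pvBad grid hiR b)
        && (PySem.List.pyRange x hiR 1).all (fun a =>
          (!decide (loC < y) || !pvBad grid a loC) && !pvBad grid a hiC))
    then 1 else 0

-- ===== PRECONDITION & SPEC =====
-- Pre_ excludes inputs where Python A raises IndexError (point shorter than 2; a touched grid cell missing),
-- and, when the point is inside the 0..23 board, negative block sizes: a negative size is outside the natural
-- domain of 'block of cells', and A's count==target test then accidentally inverts the border check.
def Pre_surround (point : List Int) (size : Int) (grid : List (List Int)) : Prop :=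
  2 ≤ point.length ∧
  (let x := (PySem.List.pyGet? point 0).getD 0
   let y := (PySem.List.pyGet? point 1).getD 0
   (0 ≤ x ∧ x < 24 ∧ 0 ≤ y ∧ y < 24) →
     0 ≤ size ∧ x + size < (grid.length : Int) ∧
     ∀ a ∈ PySem.List.pyRange (max (x - 1) 0) (x + size + 1) 1,
       y + size < (((PySem.List.pyGet? grid a).getD []).length : Int))
instance (point : List Int) (size : Int) (grid : List (List Int)) : Decidable (Pre_surround point size grid) := by
  unfold Pre_surround; infer_instance

def pvWitness_surround : List Int × Int × List (List Int) :=
  ([1, 1], 1, [[2, 2, 2], [2, 1, 2], [0, 2, 0]])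

def Spec_surround (point : List Int) (size : Int) (grid : List (List Int)) (out : Int) : Prop := out = surround_alt point size grid
instance (point : List Int) (size : Int) (grid : List (List Int)) (out : Int) : Decidable (Spec_surround point size grid out) := by unfold Spec_surround; infer_instance

-- ===== CLAIM (what is proved, stated in full; the proofs are below) =====
def Claim_equal_surround : Prop := ∀ (point : List Int) (size : Int) (grid : List (List Int)), Dom_surround point size grid → Pre_surround point size grid → Spec_surround point size grid (surround point size grid)

-- ===== LEMMAS AND PROOFS =====

-- the cell test as a Prop
def pvOkP (g : List (List Int)) (a b : Int) : Prop := pvCell g a b = 2 ∨ pvCell g a b = 0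

-- "outside the block" test and the combined per-cell counter test, as Bools
def pvNI (x y size a b : Int) : Bool := !decide (x ≤ a ∧ a ≤ x + size - 1 ∧ y ≤ b ∧ b ≤ y + size - 1)
def pvF (g : List (List Int)) (x y size a b : Int) : Bool := pvNI x y size a b && decide (pvCell g a b = 2 ∨ pvCell g a b = 0)

lemma inner_step_eq (g : List (List Int)) (x y size a : Int) :
    (fun (c b : Int) =>
      if x ≤ a ∧ a ≤ x + size - 1 ∧ y ≤ b ∧ b ≤ y + size - 1 then c
      else if pvCell g a b = 2 ∨ pvCell g a b = 0 then c + 1 else c)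
    = (fun c b => if pvF g x y size a b = true then c + 1 else c) := by
  funext c b
  simp only [pvF, pvNI, Bool.and_eq_true, Bool.not_eq_true', decide_eq_false_iff_not,
    decide_eq_true_eq]
  split_ifs <;> first | rfl | tauto

lemma cntA_eq_sum (g : List (List Int)) (x y size loR loC : Int) :
    pvCntA g x y size loR loC
    = ((PySem.List.pyRange loR (x + size + 1) 1).map
        (fun a => ((PySem.List.pyRange loC (y + size + 1) 1).countP (pvF g x y size a) : Int))).sum := by
  unfold pvCntA
  have h : ∀ (c a : Int),
      (PySem.List.pyRange loC (y + size + 1) 1).foldl (fun c b =>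
        if x ≤ a ∧ a ≤ x + size - 1 ∧ y ≤ b ∧ b ≤ y + size - 1 then c
        else if pvCell g a b = 2 ∨ pvCell g a b = 0 then c + 1 else c) c
      = c + ((PySem.List.pyRange loC (y + size + 1) 1).countP (pvF g x y size a) : Int) := by
    intro c a
    rw [inner_step_eq g x y size a]
    exact PySem.List.foldl_count_if _ _ _
  calc (PySem.List.pyRange loR (x + size + 1) 1).foldl (fun c a =>
        (PySem.List.pyRange loC (y + size + 1) 1).foldl (fun c b =>
          if x ≤ a ∧ a ≤ x + size - 1 ∧ y ≤ b ∧ b ≤ y + size - 1 then c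
          else if pvCell g a b = 2 ∨ pvCell g a b = 0 then c + 1 else c) c) 0
      = (PySem.List.pyRange loR (x + size + 1) 1).foldl (fun c a =>
          c + ((PySem.List.pyRange loC (y + size + 1) 1).countP (pvF g x y size a) : Int)) 0 := by
        apply List.foldl_ext
        intro b a _
        exact h b a
    _ = _ := by
        rw [PySem.List.foldl_add]
        simp

lemma countF_le (g : List (List Int)) (x y size a : Int) (l : List Int) :
    l.countP (pvF g x y size a) ≤ l.countP (pvNI x y size a) := by
  apply List.countP_mono_left
  intro b _ hb
  simp only [pvF, Bool.and_eq_true] at hb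
  exact hb.1

lemma countF_eq_iff (g : List (List Int)) (x y size a : Int) (l : List Int) :
    l.countP (pvF g x y size a) = l.countP (pvNI x y size a)
    ↔ ∀ b ∈ l, pvNI x y size a b = true → pvOkP g a b := by
  induction l with
  | nil => simp
  | cons b t ih =>
    have hle := countF_le g x y size a t
    by_cases hni : pvNI x y size a b = true
    · by_cases hok : pvCell g a b = 2 ∨ pvCell g a b = 0
      · have hf : pvF g x y size a b = true := by simp [pvF, hni, hok]
        simp only [List.countP_cons, hf, hni, if_true]
        constructor
        · intro h b' hb' hni'
          rcases List.mem_cons.mp hb' with rfl | hm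
          · exact hok
          · exact (ih.mp (by omega)) b' hm hni'
        · intro h
          have : t.countP (pvF g x y size a) = t.countP (pvNI x y size a) :=
            ih.mpr (fun b' hb' => h b' (List.mem_cons_of_mem _ hb'))
          omega
      · have hf : pvF g x y size a b = false := by simp [pvF, hok]
        simp only [List.countP_cons, hf, hni, if_true, Bool.false_eq_true, if_false, add_zero]
        constructor
        · intro h; exfalso; omega
        · intro h; exact absurd (h b (List.mem_cons_self ..) hni) hok
    · have hf : pvF g x y size a b = false := by
        simp only [Bool.not_eq_true] at hni
        simp [pvF, hni]
      rw [Bool.not_eq_true] at hni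
      simp only [List.countP_cons, hf, hni, Bool.false_eq_true, if_false, add_zero]
      rw [ih]
      constructor
      · intro h b' hb' hni'
        rcases List.mem_cons.mp hb' with rfl | hm
        · exact absurd hni' (by simp [hni])
        · exact h b' hm hni'
      · intro h b' hb' hni'
        exact h b' (List.mem_cons_of_mem _ hb') hni'

lemma sum_map_natCast (l : List Int) (f : Int → Nat) :
    (l.map (fun a => ((f a : Nat) : Int))).sum = (((l.map f).sum : Nat) : Int) := by
  induction l with
  | nil => simp
  | cons a t ih => simp [ih]

lemma sum_map_eq_iff (l : List Int) (f g : Int → Nat) (h : ∀ a ∈ l, f a ≤ g a) :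
    ((l.map f).sum = (l.map g).sum ↔ ∀ a ∈ l, f a = g a) := by
  induction l with
  | nil => simp
  | cons a t ih =>
    have h1 := h a (by simp)
    have h2 : ∀ a ∈ t, f a ≤ g a := fun a ha => h a (by simp [ha])
    have h3 : (t.map f).sum ≤ (t.map g).sum := List.sum_le_sum h2
    have := ih h2
    simp only [List.map_cons, List.sum_cons, List.mem_cons]
    constructor
    · intro hsum
      have hfa : f a = g a := by omega
      have ht : (t.map f).sum = (t.map g).sum := by omega
      intro b hb
      rcases hb with rfl | hm
      · exact hfa
      · exact ((ih h2).mp ht) b hm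
    · intro hall
      have hfa : f a = g a := hall a (Or.inl rfl)
      have ht : (t.map f).sum = (t.map g).sum :=
        (ih h2).mpr (fun b hb => hall b (Or.inr hb))
      omega

-- the number of ring cells A's count is compared against
lemma sum_rowMax (x y size loR loC : Int) (hS : 0 ≤ size)
    (hR : loR = x - 1 ∨ loR = x) (hC : loC = y - 1 ∨ loC = y) :
    ((((PySem.List.pyRange loR (x + size + 1) 1).map
        (fun a => (PySem.List.pyRange loC (y + size + 1) 1).countP (pvNI x y size a))).sum : Nat) : Int)
    = (x + size + 1 - loR) * (y + size + 1 - loC) - size * size := by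
  have hcols : ∀ a : Int, ¬ (x ≤ a ∧ a ≤ x + size - 1) →
      (PySem.List.pyRange loC (y + size + 1) 1).countP (pvNI x y size a)
      = (PySem.List.pyRange loC (y + size + 1) 1).length := by
    intro a ha
    apply List.countP_eq_length.2
    intro b _
    simp [pvNI]; omega
  have hmid : ∀ a : Int, (x ≤ a ∧ a ≤ x + size - 1) →
      (PySem.List.pyRange loC (y + size + 1) 1).countP (pvNI x y size a)
      = (y - loC).toNat + 1 := by
    intro a ha
    rw [PySem.List.pyRange_one_append loC y (y + size + 1) (by omega) (by omega),
        PySem.List.pyRange_one_append y (y + size) (y + size + 1) (by omega) (by omega),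
        List.countP_append, List.countP_append]
    have c1 : (PySem.List.pyRange loC y 1).countP (pvNI x y size a)
        = (PySem.List.pyRange loC y 1).length := by
      apply List.countP_eq_length.2
      intro b hb
      rw [PySem.List.mem_pyRange_one] at hb
      simp [pvNI]; omega
    have c2 : (PySem.List.pyRange y (y + size) 1).countP (pvNI x y size a) = 0 := by
      apply List.countP_eq_zero.2
      intro b hb
      rw [PySem.List.mem_pyRange_one] at hb
      simp [pvNI]; omega
    have c3 : (PySem.List.pyRange (y + size) (y + size + 1) 1).countP (pvNI x y size a)
        = (PySem.List.pyRange (y + size) (y + size + 1) 1).length := by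
      apply List.countP_eq_length.2
      intro b hb
      rw [PySem.List.mem_pyRange_one] at hb
      simp [pvNI]; omega
    rw [c1, c2, c3, PySem.List.length_pyRange_one, PySem.List.length_pyRange_one]
    omega
  rw [PySem.List.pyRange_one_append loR x (x + size + 1) (by omega) (by omega),
      PySem.List.pyRange_one_append x (x + size) (x + size + 1) (by omega) (by omega),
      List.map_append, List.map_append, List.sum_append, List.sum_append]
  have s1 : ((PySem.List.pyRange loR x 1).map
      (fun a => (PySem.List.pyRange loC (y + size + 1) 1).countP (pvNI x y size a))).sum
      = (x - loR).toNat * (y + size + 1 - loC).toNat := by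
    rw [List.map_congr_left (g := fun _ => (y + size + 1 - loC).toNat)
        (fun a ha => by
          rw [PySem.List.mem_pyRange_one] at ha
          rw [hcols a (by omega), PySem.List.length_pyRange_one])]
    simp [List.sum_replicate, PySem.List.length_pyRange_one]
  have s2 : ((PySem.List.pyRange x (x + size) 1).map
      (fun a => (PySem.List.pyRange loC (y + size + 1) 1).countP (pvNI x y size a))).sum
      = size.toNat * ((y - loC).toNat + 1) := by
    rw [List.map_congr_left (g := fun _ => (y - loC).toNat + 1)
        (fun a ha => by
          rw [PySem.List.mem_pyRange_one] at ha
          exact hmid a (by omega))]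
    simp [List.sum_replicate, PySem.List.length_pyRange_one]
  have s3 : ((PySem.List.pyRange (x + size) (x + size + 1) 1).map
      (fun a => (PySem.List.pyRange loC (y + size + 1) 1).countP (pvNI x y size a))).sum
      = 1 * (y + size + 1 - loC).toNat := by
    rw [List.map_congr_left (g := fun _ => (y + size + 1 - loC).toNat)
        (fun a ha => by
          rw [PySem.List.mem_pyRange_one] at ha
          rw [hcols a (by omega), PySem.List.length_pyRange_one])]
    simp
  rw [s1, s2, s3]
  have e1 : (((x - loR).toNat : Nat) : Int) = x - loR := Int.toNat_of_nonneg (by omega)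
  have e2 : (((y + size + 1 - loC).toNat : Nat) : Int) = y + size + 1 - loC :=
    Int.toNat_of_nonneg (by omega)
  have e3 : ((size.toNat : Nat) : Int) = size := Int.toNat_of_nonneg (by omega)
  have e4 : (((y - loC).toNat : Nat) : Int) = y - loC := Int.toNat_of_nonneg (by omega)
  push_cast [e1, e2, e3, e4]
  ring

-- the set of border cells visited by A's quadruple quantification equals B's two perimeter scans
lemma ring_iff (x y size loR loC : Int) (hS : 0 ≤ size)
    (hR : loR = x - 1 ∨ loR = x) (hC : loC = y - 1 ∨ loC = y)
    (hRx : loR < x ↔ loR = x - 1) (hCy : loC < y ↔ loC = y - 1)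
    (ok : Int → Int → Prop) :
    (∀ a, loR ≤ a → a < x + size + 1 → ∀ b, loC ≤ b → b < y + size + 1 →
        ¬ (x ≤ a ∧ a ≤ x + size - 1 ∧ y ≤ b ∧ b ≤ y + size - 1) → ok a b)
    ↔ ((∀ b, loC ≤ b → b < y + size + 1 → (loR < x → ok loR b) ∧ ok (x + size) b)
       ∧ (∀ a, x ≤ a → a < x + size → (loC < y → ok a loC) ∧ ok a (y + size))) := by
  constructor
  · intro h
    refine ⟨fun b hb1 hb2 => ⟨fun hlt => h loR (by omega) (by omega) b hb1 hb2 (by omega),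
            h (x + size) (by omega) (by omega) b hb1 hb2 (by omega)⟩,
            fun a ha1 ha2 => ⟨fun hlt => h a (by omega) (by omega) loC (by omega) (by omega) (by omega),
            h a (by omega) (by omega) (y + size) (by omega) (by omega) (by omega)⟩⟩
  · rintro ⟨h1, h2⟩ a ha1 ha2 b hb1 hb2 hni
    by_cases hae : a = x + size
    · exact hae ▸ (h1 b hb1 hb2).2
    by_cases har : a = loR ∧ loR < x
    · exact har.1 ▸ (h1 b hb1 hb2).1 har.2
    have hain : x ≤ a ∧ a ≤ x + size - 1 := by
      rcases hR with h | h <;> omega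
    by_cases hbe : b = y + size
    · exact hbe ▸ (h2 a (by omega) (by omega)).2
    by_cases hbc : b = loC ∧ loC < y
    · exact hbc.1 ▸ (h2 a (by omega) (by omega)).1 hbc.2
    exact absurd (by rcases hC with h | h <;> omega) hni

lemma pvGuard_iff (g : List (List Int)) (c : Prop) [Decidable c] (u v u2 v2 : Int) :
    ((!decide c || !pvBad g u v) = true ∧ (!pvBad g u2 v2) = true)
    ↔ ((c → pvOkP g u v) ∧ pvOkP g u2 v2) := by
  by_cases hc : c <;> simp [hc, pvBad, pvOkP]

-- the master branch lemma: A's count test ↔ B's perimeter test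
lemma branch_iff (g : List (List Int)) (x y size loR loC : Int) (hS : 0 ≤ size)
    (hR : loR = x - 1 ∨ loR = x) (hC : loC = y - 1 ∨ loC = y)
    (hRx : loR < x ↔ loR = x - 1) (hCy : loC < y ↔ loC = y - 1)
    (T : Int) (hT : T = (x + size + 1 - loR) * (y + size + 1 - loC) - size * size) :
    (pvCntA g x y size loR loC = T)
    ↔ (((PySem.List.pyRange loC (y + size + 1) 1).all (fun b =>
          (!decide (loR < x) || !pvBad g loR b) && !pvBad g (x + size) b)
        && (PySem.List.pyRange x (x + size) 1).all (fun a =>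
          (!decide (loC < y) || !pvBad g a loC) && !pvBad g a (y + size))) = true) := by
  rw [cntA_eq_sum]
  have hle : ∀ a ∈ PySem.List.pyRange loR (x + size + 1) 1,
      (PySem.List.pyRange loC (y + size + 1) 1).countP (pvF g x y size a)
      ≤ (PySem.List.pyRange loC (y + size + 1) 1).countP (pvNI x y size a) :=
    fun a _ => countF_le g x y size a _
  have key : (((PySem.List.pyRange loR (x + size + 1) 1).map
        (fun a => ((PySem.List.pyRange loC (y + size + 1) 1).countP (pvF g x y size a) : Int))).sum = T)
      ↔ ∀ a ∈ PySem.List.pyRange loR (x + size + 1) 1,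
          (PySem.List.pyRange loC (y + size + 1) 1).countP (pvF g x y size a)
          = (PySem.List.pyRange loC (y + size + 1) 1).countP (pvNI x y size a) := by
    rw [sum_map_natCast]
    rw [← sum_map_eq_iff _ _ _ hle]
    constructor
    · intro h
      have := sum_rowMax x y size loR loC hS hR hC
      omega
    · intro h
      rw [h, sum_rowMax x y size loR loC hS hR hC, hT]
  rw [key]
  have step : (∀ a ∈ PySem.List.pyRange loR (x + size + 1) 1,
      (PySem.List.pyRange loC (y + size + 1) 1).countP (pvF g x y size a)
      = (PySem.List.pyRange loC (y + size + 1) 1).countP (pvNI x y size a))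
      ↔ (∀ a, loR ≤ a → a < x + size + 1 → ∀ b, loC ≤ b → b < y + size + 1 →
          ¬ (x ≤ a ∧ a ≤ x + size - 1 ∧ y ≤ b ∧ b ≤ y + size - 1) → pvOkP g a b) := by
    constructor
    · intro h a ha1 ha2 b hb1 hb2 hni
      exact (countF_eq_iff g x y size a _).mp
        (h a (PySem.List.mem_pyRange_one.2 ⟨ha1, ha2⟩)) b
        (PySem.List.mem_pyRange_one.2 ⟨hb1, hb2⟩) (by simp [pvNI]; omega)
    · intro h a ha
      rw [PySem.List.mem_pyRange_one] at ha
      rw [countF_eq_iff]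
      intro b hb hni
      rw [PySem.List.mem_pyRange_one] at hb
      simp [pvNI] at hni
      exact h a ha.1 ha.2 b hb.1 hb.2 (by omega)
  rw [step, ring_iff x y size loR loC hS hR hC hRx hCy (pvOkP g)]
  simp only [Bool.and_eq_true, List.all_eq_true]
  constructor
  · rintro ⟨h1, h2⟩
    refine ⟨fun b hb => (pvGuard_iff g (loR < x) loR b (x + size) b).2 ?_,
            fun a ha => (pvGuard_iff g (loC < y) a loC a (y + size)).2 ?_⟩
    · rw [PySem.List.mem_pyRange_one] at hb
      exact h1 b hb.1 hb.2
    · rw [PySem.List.mem_pyRange_one] at ha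
      exact h2 a ha.1 ha.2
  · rintro ⟨h1, h2⟩
    exact ⟨fun b hb1 hb2 => (pvGuard_iff g (loR < x) loR b (x + size) b).1
             (h1 b (PySem.List.mem_pyRange_one.2 ⟨hb1, hb2⟩)),
           fun a ha1 ha2 => (pvGuard_iff g (loC < y) a loC a (y + size)).1
             (h2 a (PySem.List.mem_pyRange_one.2 ⟨ha1, ha2⟩))⟩

-- ===== VERDICT (by name: the statement is the Claim_ definition above) =====
theorem surround_spec : Claim_equal_surround := by
  intro point size grid _ hpre
  unfold Spec_surround surround surround_alt
  obtain ⟨-, hpre2⟩ := hpre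
  set x := (PySem.List.pyGet? point 0).getD 0 with hx
  set y := (PySem.List.pyGet? point 1).getD 0 with hy
  simp only at hpre2 ⊢
  by_cases hact : 0 ≤ x ∧ x < 24 ∧ 0 ≤ y ∧ y < 24
  · obtain ⟨hS, -, -⟩ := hpre2 hact
    by_cases hx0 : 0 < x <;> by_cases hy0 : 0 < y
    · -- interior: loR = x-1, loC = y-1
      rw [if_pos (show 0 < x ∧ x < 24 ∧ 0 < y ∧ y < 24 from ⟨hx0, hact.2.1, hy0, hact.2.2.2⟩),
          if_neg (not_not_intro hact)]
      rw [show max (x - 1) 0 = x - 1 by omega, show max (y - 1) 0 = y - 1 by omega]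
      exact if_congr (branch_iff grid x y size (x - 1) (y - 1) hS (Or.inl rfl) (Or.inl rfl)
            (by omega) (by omega) (4 * (size + 1)) (by ring)) rfl rfl
    · -- x > 0, y = 0: loR = x-1, loC = y
      have hy0' : y = 0 := by omega
      rw [if_neg (show ¬(0 < x ∧ x < 24 ∧ 0 < y ∧ y < 24) by omega),
          if_neg (show ¬(x = 0 ∧ y = 0) by omega),
          if_neg (show ¬(x = 0 ∧ 0 < y ∧ y < 24) by omega),
          if_pos (show 0 < x ∧ x < 24 ∧ y = 0 from ⟨hx0, hact.2.1, hy0'⟩),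
          if_neg (not_not_intro hact)]
      rw [show max (x - 1) 0 = x - 1 by omega, show max (y - 1) 0 = y by omega]
      exact if_congr (branch_iff grid x y size (x - 1) y hS (Or.inl rfl) (Or.inr rfl)
            (by omega) (by omega) (3 * (size + 1) - 1) (by ring)) rfl rfl
    · -- x = 0, y > 0: loR = x, loC = y-1
      have hx0' : x = 0 := by omega
      rw [if_neg (show ¬(0 < x ∧ x < 24 ∧ 0 < y ∧ y < 24) by omega),
          if_neg (show ¬(x = 0 ∧ y = 0) by omega),
          if_pos (show x = 0 ∧ 0 < y ∧ y < 24 from ⟨hx0', hy0, hact.2.2.2⟩),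
          if_neg (not_not_intro hact)]
      rw [show max (x - 1) 0 = x by omega, show max (y - 1) 0 = y - 1 by omega]
      exact if_congr (branch_iff grid x y size x (y - 1) hS (Or.inr rfl) (Or.inl rfl)
            (by omega) (by omega) (3 * (size + 1) - 1) (by ring)) rfl rfl
    · -- x = 0, y = 0
      have hx0' : x = 0 := by omega
      have hy0' : y = 0 := by omega
      rw [if_neg (show ¬(0 < x ∧ x < 24 ∧ 0 < y ∧ y < 24) by omega),
          if_pos (show x = 0 ∧ y = 0 from ⟨hx0', hy0'⟩),
          if_neg (not_not_intro hact)]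
      rw [show max (x - 1) 0 = x by omega, show max (y - 1) 0 = y by omega]
      exact if_congr (branch_iff grid x y size x y hS (Or.inr rfl) (Or.inr rfl)
            (by omega) (by omega) (2 * (size + 1) - 1) (by ring)) rfl rfl
  · -- off the board: both return 0
    rw [if_neg (show ¬(0 < x ∧ x < 24 ∧ 0 < y ∧ y < 24) by omega),
        if_neg (show ¬(x = 0 ∧ y = 0) by omega),
        if_neg (show ¬(x = 0 ∧ 0 < y ∧ y < 24) by omega),
        if_neg (show ¬(0 < x ∧ x < 24 ∧ y = 0) by omega),
        if_pos hact]
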